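-- pv_equiv track=rewrite | github.com/abedit/Automated-Anonymization-of-Parole-Hearing-Transcripts | _SourceCode/Anonymization/pseudonymization_methods/Spelled_Name_Pseudonymization.py | _normalized_name
-- ===== SOURCE A (Python) =====
-- def _normalized_name(spelled_name):
--     """
--     Spelled names are spelled with dashes in between, so we just remove the dashes and reconstruct the name.
--     Reconstruction is done keeping in mind that sometimes there are more than one name in one spelled name
--     annotation
--
--     Parameters:
--         spelled_name (str): The spelled name
--
--     Returns:
--         str: the name after removing the dashes
--     """
--     parts = []  # sometimes a spelled name may actually contain more than 1 name in the same annotation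
--     part = ""
--     expect_next_char = True  # flag to alternate between checking for characters and dashes -
--
--     for char in spelled_name:
--         if char.isalpha() and expect_next_char:
--             part += char
--             expect_next_char = False
--         elif char == '-':
--             expect_next_char = True
--             continue
--         elif char.isalpha():
--             parts.append(part)
--             part = char
--
--     parts.append(part)
--     return ' '.join(parts)
-- ===== SOURCE B (Python) =====
-- def _normalized_name(spelled_name):
--     # Two-pass: keep only letters and dashes, then emit each letter,
--     # prefixing a space when the previous kept character was not a dash.
--     s = ''.join(c for c in spelled_name if c.isalpha() or c == '-')
--     out = []
--     for prev, cur in zip('-' + s, s):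
--         if cur != '-':
--             if prev != '-':
--                 out.append(' ')
--             out.append(cur)
--     return ''.join(out)
-- ===== Notes on version B (the rewrite author's own statement) =====
-- stated objective: alternative
-- what changed: A's single-pass flag automaton (expect_next_char toggling over parts/part accumulators plus a final join) is replaced by a two-pass pipeline: filter to keep only letters and dashes, then one zip over the filtered string and its shift that emits each letter, space-prefixed when the previous kept character is not a dash.
import Mathlib
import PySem

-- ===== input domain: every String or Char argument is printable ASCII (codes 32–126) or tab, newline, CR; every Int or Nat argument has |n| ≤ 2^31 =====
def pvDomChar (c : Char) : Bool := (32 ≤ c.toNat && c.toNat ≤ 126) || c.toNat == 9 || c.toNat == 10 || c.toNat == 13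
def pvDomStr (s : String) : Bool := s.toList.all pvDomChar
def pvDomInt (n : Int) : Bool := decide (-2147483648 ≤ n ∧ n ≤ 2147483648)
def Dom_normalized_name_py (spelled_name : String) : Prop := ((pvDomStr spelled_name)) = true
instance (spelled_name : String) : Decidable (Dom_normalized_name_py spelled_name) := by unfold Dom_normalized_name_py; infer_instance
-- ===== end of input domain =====

-- B replaces A's one-pass flag automaton by a filter pass (keep letters and dashes)
-- followed by a pairwise scan of the filtered string; objective: idiomatic/alternative.

-- ===== PORT A =====
-- A's loop state: parts (list of finished names), part (current name), expect_next_char.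
def aLoop : List Char → List (List Char) → List Char → Bool → List (List Char)
  | [], parts, part, _ => parts ++ [part]
  | c :: rest, parts, part, expect =>
    if PySem.Chars.isalpha c && expect then aLoop rest parts (part ++ [c]) false
    else if c = '-' then aLoop rest parts part true
    else if PySem.Chars.isalpha c then aLoop rest (parts ++ [part]) [c] false
    else aLoop rest parts part expect

def normalized_name_py (spelled_name : String) : String :=
  PySem.Str.join " " ((aLoop spelled_name.toList [] [] true).map String.ofList)

-- ===== PORT B =====
def bKeep (c : Char) : Bool := PySem.Chars.isalpha c || c == '-'

def normalized_name_py_alt (spelled_name : String) : String :=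
  let s := spelled_name.toList.filter bKeep
  let out := (List.zip ('-' :: s) s).flatMap (fun pc =>
    if pc.2 ≠ '-' then (if pc.1 ≠ '-' then [' ', pc.2] else [pc.2]) else [])
  String.ofList out

-- ===== PRECONDITION & SPEC =====
def Spec_normalized_name_py (spelled_name : String) (out : String) : Prop := out = normalized_name_py_alt spelled_name
instance (spelled_name : String) (out : String) : Decidable (Spec_normalized_name_py spelled_name out) := by unfold Spec_normalized_name_py; infer_instance

-- ===== CLAIM (what is proved, stated in full; the proofs are below) =====
def Claim_equal_normalized_name_py : Prop := ∀ (spelled_name : String), Dom_normalized_name_py spelled_name → Spec_normalized_name_py spelled_name (normalized_name_py spelled_name)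

-- ===== LEMMAS AND PROOFS =====

-- B's zip-of-shifted-lists loop, recast as a recursion carrying the previous kept char.
def bGo : List Char → Char → List Char
  | [], _ => []
  | c :: rest, prev =>
    (if c ≠ '-' then (if prev ≠ '-' then [' ', c] else [c]) else []) ++ bGo rest c

theorem zip_flatMap_eq_bGo (s : List Char) : ∀ (prev : Char),
    (List.zip (prev :: s) s).flatMap (fun pc =>
      if pc.2 ≠ '-' then (if pc.1 ≠ '-' then [' ', pc.2] else [pc.2]) else []) = bGo s prev := by
  induction s with
  | nil => intro prev; rfl
  | cons c rest ih =>
    intro prev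
    simp only [List.zip_cons_cons, List.flatMap_cons, bGo, ih c]

-- 'join sep (l ++ [y])': appending one more piece.
theorem join_append_singleton (sep : List Char) (l : List (List Char)) (y : List Char) :
    PySem.Chars.join sep (l ++ [y]) =
      if l.isEmpty then y else PySem.Chars.join sep l ++ sep ++ y := by
  induction l with
  | nil => simp [PySem.Chars.join_singleton]
  | cons a l ih =>
    cases l with
    | nil => simp [PySem.Chars.join_cons_cons, PySem.Chars.join_singleton]
    | cons b l' =>
      rw [List.cons_append] at ih
      rw [List.cons_append, List.cons_append, PySem.Chars.join_cons_cons, ih]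
      simp [PySem.Chars.join_cons_cons, List.append_assoc]

-- A ignores characters that are neither letters nor dashes: its loop only sees the filtered list.
theorem aLoop_filter (s : List Char) : ∀ parts part expect,
    aLoop s parts part expect = aLoop (s.filter bKeep) parts part expect := by
  induction s with
  | nil => intro parts part expect; rfl
  | cons c rest ih =>
    intro parts part expect
    by_cases hk : bKeep c = true
    · rw [List.filter_cons_of_pos hk]
      by_cases ha : PySem.Chars.isalpha c = true
      · by_cases he : expect = true
        · simp only [aLoop, ha, he, Bool.and_self, ih]
        · simp only [Bool.not_eq_true] at he
          subst he
          by_cases hd : c = '-'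
          · simp only [aLoop, ha, Bool.and_false, Bool.false_eq_true, if_false, if_pos hd, ih]
          · simp only [aLoop, ha, Bool.and_false, Bool.false_eq_true, if_false, if_neg hd, ih]
      · have hd : c = '-' := by
          simp only [bKeep, Bool.or_eq_true, beq_iff_eq] at hk
          tauto
        simp only [aLoop, ha, Bool.false_and, Bool.false_eq_true, if_false, if_pos hd, ih]
    · have ha : PySem.Chars.isalpha c = false := by
        simp only [bKeep, Bool.or_eq_true, beq_iff_eq] at hk
        simp [not_or] at hk
        simp [hk.1]
      have hd : ¬ c = '-' := by
        simp only [bKeep, Bool.or_eq_true, beq_iff_eq] at hk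
        simp [not_or] at hk
        exact hk.2
      rw [List.filter_cons_of_neg (by simp [hk])]
      simp only [aLoop, ha, Bool.false_and, Bool.false_eq_true, if_false, if_neg hd, ih]

-- The core invariant: on a letters-and-dashes string, A's automaton (with expect ↔ prev = '-')
-- extends the already-joined output exactly by B's pairwise emission.
theorem aLoop_eq_bGo (s : List Char) (hs : ∀ c ∈ s, bKeep c = true) :
    ∀ (parts : List (List Char)) (part : List Char) (prev : Char),
    PySem.Chars.join [' '] (aLoop s parts part (prev == '-')) =
      PySem.Chars.join [' '] (parts ++ [part]) ++ bGo s prev := by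
  induction s with
  | nil => intro parts part prev; simp [aLoop, bGo]
  | cons c rest ih =>
    intro parts part prev
    have hc : bKeep c = true := hs c (List.mem_cons_self ..)
    have hrest : ∀ c ∈ rest, bKeep c = true := fun x hx => hs x (List.mem_cons_of_mem _ hx)
    by_cases hd : c = '-'
    · subst hd
      have ha : PySem.Chars.isalpha '-' = false := by decide
      simp only [aLoop, ha, Bool.false_and, Bool.false_eq_true, if_false, bGo, ite_not]
      have := ih hrest parts part '-'
      simpa using this
    · have ha : PySem.Chars.isalpha c = true := by
        simp only [bKeep, Bool.or_eq_true, beq_iff_eq] at hc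
        tauto
      have hcb : (c == '-') = false := by simp [hd]
      by_cases hp : prev = '-'
      · subst hp
        simp only [aLoop, ha, Bool.true_and, beq_self_eq_true, if_true, bGo, ite_not, if_neg hd]
        have h2 := ih hrest parts (part ++ [c]) c
        rw [hcb] at h2
        rw [h2]
        rw [join_append_singleton [' '] parts (part ++ [c]),
            join_append_singleton [' '] parts part]
        by_cases hpe : parts.isEmpty
        · simp [hpe, List.append_assoc]
        · simp [hpe, List.append_assoc]
      · have hpb : (prev == '-') = false := by simp [hp]
        simp only [aLoop, ha, hpb, Bool.true_and, Bool.false_eq_true, if_false, if_true, bGo, ite_not, if_neg hd, if_neg hp]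
        have h2 := ih hrest (parts ++ [part]) [c] c
        rw [hcb] at h2
        rw [h2]
        rw [join_append_singleton [' '] (parts ++ [part]) [c]]
        have hne : (parts ++ [part]).isEmpty = false := by simp
        simp [hne, List.append_assoc]

theorem toList_normalized_name_py (spelled_name : String) :
    (normalized_name_py spelled_name).toList = (normalized_name_py_alt spelled_name).toList := by
  simp only [normalized_name_py, normalized_name_py_alt]
  rw [PySem.Str.toList_join, List.map_map]
  have hid : (String.toList ∘ String.ofList) = (id : List Char → List Char) := by
    funext l; simp
  rw [hid, List.map_id, aLoop_filter]
  rw [zip_flatMap_eq_bGo]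
  have hs : ∀ c ∈ spelled_name.toList.filter bKeep, bKeep c = true :=
    fun c hc => List.of_mem_filter hc
  have h := aLoop_eq_bGo (spelled_name.toList.filter bKeep) hs [] [] '-'
  simp only [beq_self_eq_true] at h
  rw [show (" ".toList) = [' '] from rfl, h]
  simp [PySem.Chars.join_singleton]

-- ===== VERDICT (by name: the statement is the Claim_ definition above) =====
theorem normalized_name_py_spec : Claim_equal_normalized_name_py := by
  intro spelled_name _
  unfold Spec_normalized_name_py
  exact (String.toList_inj.mp (toList_normalized_name_py spelled_name))
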